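-- pv_equiv track=rewrite | github.com/emilia-c/AMO-Work | assistant task/9 term/code/downloading mep assistant pages/clean_mep_assistants_9term.py | count_blank_and_none_instances
-- ===== SOURCE A (Python) =====
-- def count_blank_and_none_instances(data):
--     blank_counts = {
--         "name": 0,
--         "party": 0,
--         "country": 0,
--     }
--
--     none_counts = {
--         "name": 0,
--         "party": 0,
--         "country": 0,
--     }
--
--     party_none_info = []  # To store information of MEPs with None party values
--
--     for person in data:
--         # Check and count blanks and None values for name, party, and country
--         name = person.get("name")
--         party = person.get("party")
--         country = person.get("country")
--
--         # Count blank instances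
--         if isinstance(name, str) and not name.strip():
--             blank_counts["name"] += 1
--         if isinstance(party, str) and not party.strip():
--             blank_counts["party"] += 1
--         if isinstance(country, str) and not country.strip():
--             blank_counts["country"] += 1
--
--         # Count None values and track their information
--         if name is None:
--             none_counts["name"] += 1
--         if party is None:
--             none_counts["party"] += 1
--             party_none_info.append(person)  # Store entire person record
--         if country is None:
--             none_counts["country"] += 1
--
--     return blank_counts, none_counts, party_none_info
-- ===== SOURCE B (Python) =====
-- def count_blank_and_none_instances(data):
--     # Idiomatic re-implementation: several independent full passes over data
--     # (one sum-comprehension per field/statistic) instead of one fused loop.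
--     fields = ("name", "party", "country")
--
--     def is_blank(v):
--         return isinstance(v, str) and not v.strip()
--
--     blank_counts = {k: sum(1 for person in data if is_blank(person.get(k)))
--                     for k in fields}
--     none_counts = {k: sum(1 for person in data if person.get(k) is None)
--                    for k in fields}
--     party_none_info = [person for person in data if person.get("party") is None]
--     return blank_counts, none_counts, party_none_info
-- ===== Notes on version B (the rewrite author's own statement) =====
-- stated objective: idiomatic
-- what changed: Replaces A's single fused loop maintaining mutable dict counters with seven independent passes over data: each blank/None count is a per-field sum-comprehension and party_none_info is a list comprehension, the dicts being assembled from these results.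
import Mathlib
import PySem

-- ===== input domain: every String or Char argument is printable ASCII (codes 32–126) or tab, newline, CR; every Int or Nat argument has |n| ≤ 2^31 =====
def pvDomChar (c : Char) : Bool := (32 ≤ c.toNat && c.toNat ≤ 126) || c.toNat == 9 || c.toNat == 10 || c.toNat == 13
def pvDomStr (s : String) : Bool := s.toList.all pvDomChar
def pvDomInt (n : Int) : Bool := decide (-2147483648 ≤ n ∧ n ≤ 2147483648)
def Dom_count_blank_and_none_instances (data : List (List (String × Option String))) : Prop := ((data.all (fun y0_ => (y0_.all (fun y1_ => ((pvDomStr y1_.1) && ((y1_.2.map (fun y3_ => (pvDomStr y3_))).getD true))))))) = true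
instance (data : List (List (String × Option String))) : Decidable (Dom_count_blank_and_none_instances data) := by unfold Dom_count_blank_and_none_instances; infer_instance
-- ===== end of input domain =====

-- B replaces A's single fused loop (mutable dict counters) with independent per-field
-- passes over data: each count is its own scan, the dicts are assembled at the end (idiomatic, same cost).

-- ===== PORT A =====
-- person.get(k): first-match lookup; missing key and a stored None both give Python None = none
def dget (p : List (String × Option String)) (k : String) : Option String :=
  ((p.find? (fun kv => kv.1 == k)).map (·.2)).join

-- isinstance(v, str) and not v.strip()
def pvIsBlank (v : Option String) : Bool :=
  match v with
  | some s => PySem.Chars.strip s.toList == []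
  | none => false

-- the body of A's for-loop, on the state (blank_counts, none_counts, party_none_info)
def pvStepA (st : PySem.Dict String Int × PySem.Dict String Int × List (List (String × Option String)))
    (person : List (String × Option String)) :
    PySem.Dict String Int × PySem.Dict String Int × List (List (String × Option String)) :=
  let name := dget person "name"
  let party := dget person "party"
  let country := dget person "country"
  let bd := if pvIsBlank name then st.1.modify "name" 0 (· + 1) else st.1
  let bd := if pvIsBlank party then bd.modify "party" 0 (· + 1) else bd
  let bd := if pvIsBlank country then bd.modify "country" 0 (· + 1) else bd
  let nd := if name.isNone then st.2.1.modify "name" 0 (· + 1) else st.2.1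
  let ndpl := if party.isNone then (nd.modify "party" 0 (· + 1), st.2.2 ++ [person])
              else (nd, st.2.2)
  let nd := if country.isNone then ndpl.1.modify "country" 0 (· + 1) else ndpl.1
  (bd, nd, ndpl.2)

def count_blank_and_none_instances (data : List (List (String × Option String))) :
    (List (String × Int)) × (List (String × Int)) × (List (List (String × Option String))) :=
  let r := data.foldl pvStepA
    (PySem.Dict.mk [("name", 0), ("party", 0), ("country", 0)],
     PySem.Dict.mk [("name", 0), ("party", 0), ("country", 0)], [])
  (r.1.items, r.2.1.items, r.2.2)

-- ===== PORT B =====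
-- sum(1 for person in data if is_blank(person.get(k))) — one full pass per field
def pvBlankCount (data : List (List (String × Option String))) (k : String) : Int :=
  (data.countP (fun person => pvIsBlank (dget person k)) : Int)

-- sum(1 for person in data if person.get(k) is None) — one full pass per field
def pvNoneCount (data : List (List (String × Option String))) (k : String) : Int :=
  (data.countP (fun person => (dget person k).isNone) : Int)

def count_blank_and_none_instances_alt (data : List (List (String × Option String))) :
    (List (String × Int)) × (List (String × Int)) × (List (List (String × Option String))) :=
  ([("name", pvBlankCount data "name"), ("party", pvBlankCount data "party"),
    ("country", pvBlankCount data "country")],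
   [("name", pvNoneCount data "name"), ("party", pvNoneCount data "party"),
    ("country", pvNoneCount data "country")],
   data.filter (fun person => (dget person "party").isNone))

-- ===== PRECONDITION & SPEC =====
def Spec_count_blank_and_none_instances (data : List (List (String × Option String))) (out : (List (String × Int)) × (List (String × Int)) × (List (List (String × Option String)))) : Prop := out = count_blank_and_none_instances_alt data
instance (data : List (List (String × Option String))) (out : (List (String × Int)) × (List (String × Int)) × (List (List (String × Option String)))) : Decidable (Spec_count_blank_and_none_instances data out) := by unfold Spec_count_blank_and_none_instances; infer_instance

-- ===== CLAIM (what is proved, stated in full; the proofs are below) =====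
def Claim_equal_count_blank_and_none_instances : Prop := ∀ (data : List (List (String × Option String))), Dom_count_blank_and_none_instances data → Spec_count_blank_and_none_instances data (count_blank_and_none_instances data)

-- ===== LEMMAS AND PROOFS =====
-- the shape A's two counter dicts keep throughout the loop
def D3 (a b c : Int) : PySem.Dict String Int :=
  PySem.Dict.mk [("name", a), ("party", b), ("country", c)]

lemma mod_name (a b c : Int) : (D3 a b c).modify "name" 0 (· + 1) = D3 (a + 1) b c := rfl
lemma mod_party (a b c : Int) : (D3 a b c).modify "party" 0 (· + 1) = D3 a (b + 1) c := rfl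
lemma mod_country (a b c : Int) : (D3 a b c).modify "country" 0 (· + 1) = D3 a b (c + 1) := rfl

lemma stepA_eq (a b c x y z : Int) (pl : List (List (String × Option String)))
    (p : List (String × Option String)) :
    pvStepA (D3 a b c, D3 x y z, pl) p =
      (D3 (a + if pvIsBlank (dget p "name") then 1 else 0)
          (b + if pvIsBlank (dget p "party") then 1 else 0)
          (c + if pvIsBlank (dget p "country") then 1 else 0),
       D3 (x + if (dget p "name").isNone then 1 else 0)
          (y + if (dget p "party").isNone then 1 else 0)
          (z + if (dget p "country").isNone then 1 else 0),
       pl ++ if (dget p "party").isNone then [p] else []) := by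
  simp only [pvStepA]
  split_ifs <;> simp [mod_name, mod_party, mod_country]

lemma foldA_eq (data : List (List (String × Option String))) :
    ∀ (a b c x y z : Int) (pl : List (List (String × Option String))),
    data.foldl pvStepA (D3 a b c, D3 x y z, pl) =
      (D3 (a + pvBlankCount data "name") (b + pvBlankCount data "party")
          (c + pvBlankCount data "country"),
       D3 (x + pvNoneCount data "name") (y + pvNoneCount data "party")
          (z + pvNoneCount data "country"),
       pl ++ data.filter (fun person => (dget person "party").isNone)) := by
  induction data with
  | nil => intro a b c x y z pl; simp [pvBlankCount, pvNoneCount]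
  | cons p t ih =>
    intro a b c x y z pl
    rw [List.foldl_cons, stepA_eq, ih]
    simp only [pvBlankCount, pvNoneCount, List.countP_cons, List.filter_cons, D3,
      Prod.mk.injEq, PySem.Dict.mk.injEq, List.cons.injEq, and_true, true_and]
    refine ⟨⟨?_, ?_, ?_⟩, ⟨?_, ?_, ?_⟩, ?_⟩ <;> split_ifs <;> push_cast <;> first | omega | simp

-- ===== VERDICT (by name: the statement is the Claim_ definition above) =====
theorem count_blank_and_none_instances_spec : Claim_equal_count_blank_and_none_instances := by
  intro data _
  unfold Spec_count_blank_and_none_instances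
  have h := foldA_eq data 0 0 0 0 0 0 []
  simp only [zero_add, List.nil_append] at h
  simp only [count_blank_and_none_instances, count_blank_and_none_instances_alt]
  rw [show (PySem.Dict.mk [("name", (0:Int)), ("party", 0), ("country", 0)],
        PySem.Dict.mk [("name", (0:Int)), ("party", 0), ("country", 0)],
        ([] : List (List (String × Option String)))) = (D3 0 0 0, D3 0 0 0, []) from rfl, h]
  rfl
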